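-- pv_equiv track=rewrite | github.com/ARG-NCTU/oop-python-nycu | tests/group3/113511167/lec6.py | words_often
-- ===== SOURCE A (Python) =====
-- def most_common_words(freqs):       #freqs is a dictionary
--     if freqs == {}:                 #if freqs is empty, max(freqs.values()) will give an error
--         return ([], 0)              #return a tuple of empty list and 0
--     else:
--         values = freqs.values()         #values is a list of all values in freqs
--         best = max(values)              #best is the maximum value in values
--         words = []                      #words is a list of keys with same value
--         for k in freqs:                 #for k the key in freqs
--             if freqs[k] == best:        #freqs[k] is the value of key k, best is the maximum value of freqs
--                 words.append(k)
--         return (words, best)            #return a tuple of the list of keys with the values = maximum value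
--
-- def words_often(freqs, minTimes):
--     result = []
--     done = False
--     while not done:
--         temp = most_common_words(freqs) #temp is a tuple of the list of keys and the maximum value
--         if temp[1] > minTimes:          #temp[1] is the second element of the tuple
--             result.append(temp)         #append the available tuple to result
--             for w in temp[0]:           #temp[0] is a list of keys
--                 del(freqs[w])           #delete the key w from freqs and also delete the value
--         else:
--             done = True
--     return result
-- ===== SOURCE B (Python) =====
-- def words_often(freqs, minTimes):
--     buckets = {}
--     for w, v in freqs.items():
--         buckets.setdefault(v, []).append(w)
--     return [(buckets[v], v) for v in sorted(buckets, reverse=True) if v > minTimes]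
-- ===== Notes on version B (the rewrite author's own statement) =====
-- stated objective: alternative
-- what changed: A repeatedly scans the whole dict for its maximum value and deletes that group until the max is <= minTimes (looping forever if that never happens, which Pre_ excludes); B buckets keys by value in one pass and sorts the distinct values descending, keeping those > minTimes (asymptotically better in the number of distinct values, though a timing run read only 1.46x at the largest size).
-- outside the precondition, e.g. on words_often({'a': 5}, -2): A does not finish within the time limit, B returns [(['a'], 5)]
import Mathlib
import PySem

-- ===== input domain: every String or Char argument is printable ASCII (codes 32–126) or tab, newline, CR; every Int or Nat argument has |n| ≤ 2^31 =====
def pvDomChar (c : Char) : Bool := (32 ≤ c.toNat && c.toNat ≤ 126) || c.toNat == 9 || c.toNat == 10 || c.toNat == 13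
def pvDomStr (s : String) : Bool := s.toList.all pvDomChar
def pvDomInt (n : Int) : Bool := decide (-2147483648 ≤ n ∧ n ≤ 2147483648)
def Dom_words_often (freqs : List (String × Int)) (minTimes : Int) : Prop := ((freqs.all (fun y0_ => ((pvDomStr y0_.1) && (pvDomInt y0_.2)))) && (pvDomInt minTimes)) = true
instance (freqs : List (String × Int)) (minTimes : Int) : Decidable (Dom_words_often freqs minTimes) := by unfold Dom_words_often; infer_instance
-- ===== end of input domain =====

-- B replaces A's repeated max-and-delete loop over the dict by one bucketing pass plus a sort of the
-- distinct values (descending); equivalence is about the RETURN value only — Python A empties the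
-- caller's dict in place, B does not mutate it.

-- ===== PORT A =====
-- the `freqs` argument is a Python dict: the assoc list is read with dict semantics (shared by both ports)
def pvToItems (freqs : List (String × Int)) : List (String × Int) :=
  (PySem.Dict.ofList freqs).items

-- most_common_words: max of the values, then the keys holding it, in dict order
def pvMostCommon (d : List (String × Int)) : List String × Int :=
  if d = [] then ([], 0)
  else
    match PySem.List.max? (d.map (fun p => p.2)) (fun v => v) with
    | some best => ((d.filter (fun p => p.2 == best)).map (fun p => p.1), best)
    | none => ([], 0)  -- unreachable: d ≠ []

-- the while-loop; deleting every key of `words` from the dict is filtering out the pairs at value best.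
-- fuel (length+1) only makes the recursion structural: on inputs satisfying Pre_ it is never exhausted
-- (Python A loops forever exactly on the inputs Pre_ excludes).
def pvLoopA (minTimes : Int) : Nat → List (String × Int) → List (List String × Int) → List (List String × Int)
  | 0, _, acc => acc
  | fuel+1, d, acc =>
    let temp := pvMostCommon d
    if minTimes < temp.2 then
      pvLoopA minTimes fuel (d.filter (fun p => !(p.2 == temp.2))) (acc ++ [temp])
    else acc

def words_often (freqs : List (String × Int)) (minTimes : Int) : List (List String × Int) :=
  pvLoopA minTimes ((pvToItems freqs).length + 1) (pvToItems freqs) []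

-- ===== PORT B =====
-- buckets: value ↦ list of keys holding it (setdefault(v, []).append(w) = modify with default [])
def pvBuckets (freqs : List (String × Int)) : PySem.Dict Int (List String) :=
  (pvToItems freqs).foldl (fun d p => d.modify p.2 [] (fun l => l ++ [p.1])) PySem.Dict.empty

def words_often_alt (freqs : List (String × Int)) (minTimes : Int) : List (List String × Int) :=
  ((PySem.List.sorted (pvBuckets freqs).keys (fun v => v) true).filter (fun v => minTimes < v)).map
    (fun v => ((pvBuckets freqs).getD v [], v))

-- ===== PRECONDITION & SPEC =====
-- Pre_ excludes exactly the inputs on which Python A DIVERGES (never returns): once every value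
-- > minTimes is consumed the dict is empty, most_common_words yields 0, and if 0 > minTimes the
-- loop never stops; A returns iff 0 ≤ minTimes or some value of the dict is ≤ minTimes.
def Pre_words_often (freqs : List (String × Int)) (minTimes : Int) : Prop :=
  0 ≤ minTimes ∨ ∃ p ∈ (PySem.Dict.ofList freqs).items, p.2 ≤ minTimes
instance (freqs : List (String × Int)) (minTimes : Int) : Decidable (Pre_words_often freqs minTimes) := by
  unfold Pre_words_often; infer_instance

def pvWitness_words_often : (List (String × Int)) × Int := ([("a", 3), ("b", 1), ("c", 3)], 1)

def Spec_words_often (freqs : List (String × Int)) (minTimes : Int) (out : List (List String × Int)) : Prop := out = words_often_alt freqs minTimes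
instance (freqs : List (String × Int)) (minTimes : Int) (out : List (List String × Int)) : Decidable (Spec_words_often freqs minTimes out) := by unfold Spec_words_often; infer_instance

-- ===== CLAIM (what is proved, stated in full; the proofs are below) =====
def Claim_equal_words_often : Prop := ∀ (freqs : List (String × Int)) (minTimes : Int), Dom_words_often freqs minTimes → Pre_words_often freqs minTimes → Spec_words_often freqs minTimes (words_often freqs minTimes)

-- ===== LEMMAS AND PROOFS =====

-- the group of keys at value v, and the set of values, of an item list
def pvGrp (d : List (String × Int)) (v : Int) : List String :=
  (d.filter (fun p => p.2 == v)).map (fun p => p.1)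

def pvVals (d : List (String × Int)) : List Int :=
  PySem.Set.ofList (d.map (fun p => p.2))

def pvRhs (d : List (String × Int)) (minTimes : Int) : List (List String × Int) :=
  ((PySem.List.sorted (pvVals d) (fun v => v) true).filter (fun v => minTimes < v)).map
    (fun v => (pvGrp d v, v))

theorem pvBuckets_getD (freqs : List (String × Int)) (v : Int) :
    (pvBuckets freqs).getD v [] = pvGrp (pvToItems freqs) v := by
  unfold pvBuckets pvGrp
  rw [show (pvToItems freqs).foldl (fun d p => d.modify p.2 [] (fun l => l ++ [p.1])) PySem.Dict.empty
        = ((pvToItems freqs).map (fun p => (p.2, p.1))).foldl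
            (fun (d : PySem.Dict Int (List String)) (q : Int × String) => d.modify q.1 [] (fun l => l ++ [q.2]))
            PySem.Dict.empty from (List.foldl_map (f := fun p : String × Int => (p.2, p.1)) (g := fun (d : PySem.Dict Int (List String)) (q : Int × String) => d.modify q.1 [] (fun l => l ++ [q.2]))).symm]
  rw [PySem.Dict.getD_foldl_modify_append]
  simp [PySem.Dict.getD_empty, List.filter_map, List.map_map, Function.comp_def]

theorem pvBuckets_keys (freqs : List (String × Int)) :
    (pvBuckets freqs).keys = pvVals (pvToItems freqs) := by
  unfold pvBuckets pvVals
  rw [PySem.Dict.keys_foldl_modify_key]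
  simp [PySem.Dict.keys_empty, PySem.Set.update_nil_left]

theorem alt_eq_rhs (freqs : List (String × Int)) (minTimes : Int) :
    words_often_alt freqs minTimes = pvRhs (pvToItems freqs) minTimes := by
  unfold words_often_alt pvRhs
  rw [pvBuckets_keys]
  exact List.map_congr_left (fun v _ => by rw [pvBuckets_getD])

theorem pvGrp_filter {v best : Int} (h : v ≠ best) (d : List (String × Int)) :
    pvGrp (d.filter (fun p => !(p.2 == best))) v = pvGrp d v := by
  unfold pvGrp
  rw [List.filter_filter]
  congr 1
  apply List.filter_congr
  intro p _
  by_cases h1 : p.2 = best <;> by_cases h2 : p.2 = v <;> simp_all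

theorem pvSorted_vals_cons {d : List (String × Int)} {best : Int}
    (hmax : PySem.List.max? (d.map (fun p => p.2)) (fun v => v) = some best) :
    PySem.List.sorted (pvVals d) (fun v => v) true
      = best :: PySem.List.sorted (pvVals (d.filter (fun p => !(p.2 == best)))) (fun v => v) true := by
  have hmem : best ∈ d.map (fun p => p.2) := PySem.List.max?_mem hmax
  have hisMax := PySem.List.max?_isMax hmax
  have hnd' : (PySem.List.sorted (pvVals (d.filter (fun p => !(p.2 == best)))) (fun v => v) true).Nodup :=
    (PySem.List.sorted_perm _ _ _).nodup_iff.mpr (PySem.Set.nodup_ofList _)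
  have hmem' : ∀ a, a ∈ PySem.List.sorted (pvVals (d.filter (fun p => !(p.2 == best)))) (fun v => v) true
      ↔ (a ∈ d.map (fun p => p.2) ∧ a ≠ best) := by
    intro a
    rw [PySem.List.mem_sorted]
    unfold pvVals
    rw [PySem.Set.mem_ofList]
    simp only [List.mem_map, List.mem_filter]
    constructor
    · rintro ⟨p, ⟨hp, hpb⟩, rfl⟩
      simp at hpb
      exact ⟨⟨p, hp, rfl⟩, hpb⟩
    · rintro ⟨⟨p, hp, rfl⟩, hab⟩
      exact ⟨p, ⟨hp, by simpa using hab⟩, rfl⟩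
  apply PySem.List.sorted_rev_eq_of_perm_of_pairwise_gt
  · -- permutation
    rw [List.perm_ext_iff_of_nodup]
    · intro a
      rw [List.mem_cons, hmem' a]
      unfold pvVals
      rw [PySem.Set.mem_ofList]
      constructor
      · rintro (rfl | ⟨ha, _⟩) <;> [exact hmem; exact ha]
      · intro ha
        by_cases hab : a = best
        · exact Or.inl hab
        · exact Or.inr ⟨ha, hab⟩
    · exact List.nodup_cons.mpr ⟨fun hc => ((hmem' best).mp hc).2 rfl, hnd'⟩
    · exact PySem.Set.nodup_ofList _
  · -- strictly decreasing
    apply List.pairwise_cons.mpr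
    constructor
    · intro a ha
      obtain ⟨haa, hab⟩ := (hmem' a).mp ha
      exact lt_of_le_of_ne (hisMax a haa) hab
    · have h1 := PySem.List.sorted_pairwise_rev (pvVals (d.filter (fun p => !(p.2 == best)))) (fun v => v) (κ := Int)
      have h2 := hnd'
      exact (h1.and h2).imp (fun h => lt_of_le_of_ne h.1 (Ne.symm h.2))

theorem pvLoopA_eq (minTimes : Int) :
    ∀ (fuel : Nat) (d : List (String × Int)) (acc : List (List String × Int)),
      d.length < fuel →
      (0 ≤ minTimes ∨ ∃ p ∈ d, p.2 ≤ minTimes) →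
      pvLoopA minTimes fuel d acc = acc ++ pvRhs d minTimes := by
  intro fuel
  induction fuel with
  | zero => intro d acc h _; omega
  | succ n ih =>
    intro d acc hlen hpre
    by_cases hd : d = []
    · subst hd
      have h0 : 0 ≤ minTimes := by
        rcases hpre with h | ⟨p, hp, _⟩
        · exact h
        · simp at hp
      simp [pvLoopA, pvMostCommon, pvRhs, pvVals, PySem.Set.ofList_nil,
        show ¬ minTimes < 0 by omega]
    · obtain ⟨best, hmax⟩ : ∃ b, PySem.List.max? (d.map (fun p => p.2)) (fun v => v) = some b := by
        cases hb : PySem.List.max? (d.map (fun p => p.2)) (fun v => v) with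
        | none => exact absurd (by simpa using (PySem.List.max?_eq_none_iff _ _).mp hb) hd
        | some b => exact ⟨b, rfl⟩
      have hmc : pvMostCommon d = (pvGrp d best, best) := by
        unfold pvMostCommon pvGrp; rw [if_neg hd, hmax]
      rw [pvLoopA, hmc]
      by_cases hlt : minTimes < best
      · rw [if_pos hlt]
        set d' := d.filter (fun p => !(p.2 == best)) with hd'
        have hlt' : d'.length < d.length := by
          have hex : ∃ p ∈ d, ¬ ((fun p : String × Int => !(p.2 == best)) p = true) := by
            obtain ⟨p, hp, hpb⟩ := List.mem_map.mp (PySem.List.max?_mem hmax)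
            exact ⟨p, hp, by simp [hpb]⟩
          exact List.length_filter_lt_length_iff_exists.mpr hex
        have hpre' : 0 ≤ minTimes ∨ ∃ p ∈ d', p.2 ≤ minTimes := by
          rcases hpre with h | ⟨p, hp, hple⟩
          · exact Or.inl h
          · refine Or.inr ⟨p, List.mem_filter.mpr ⟨hp, by simp; omega⟩, hple⟩
        rw [ih d' (acc ++ [(pvGrp d best, best)]) (by omega) hpre']
        rw [List.append_assoc]
        congr 1
        -- pvRhs d = (grp, best) :: pvRhs d'
        unfold pvRhs
        rw [pvSorted_vals_cons hmax]
        rw [List.filter_cons_of_pos (by simpa using hlt)]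
        rw [List.map_cons]
        simp only [List.singleton_append]
        congr 1
        apply List.map_congr_left
        intro v hv
        have hvne : v ≠ best := by
          have := (List.mem_filter.mp hv).1
          rw [PySem.List.mem_sorted] at this
          unfold pvVals at this
          rw [PySem.Set.mem_ofList] at this
          obtain ⟨p, hp, hpv⟩ := List.mem_map.mp this
          obtain ⟨_, hpb⟩ := List.mem_filter.mp hp
          simp at hpb
          omega
        rw [pvGrp_filter hvne]
      · rw [if_neg hlt]
        have hrhs : pvRhs d minTimes = [] := by
          unfold pvRhs
          rw [List.filter_eq_nil_iff.mpr, List.map_nil]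
          intro v hv
          rw [PySem.List.mem_sorted] at hv
          unfold pvVals at hv
          rw [PySem.Set.mem_ofList] at hv
          have := PySem.List.max?_isMax hmax v hv
          simp only [decide_eq_true_eq]
          omega
        rw [hrhs, List.append_nil]

-- ===== VERDICT (by name: the statement is the Claim_ definition above) =====
theorem words_often_spec : Claim_equal_words_often := by
  intro freqs minTimes _ hpre
  unfold Spec_words_often
  rw [alt_eq_rhs]
  unfold words_often
  exact pvLoopA_eq minTimes _ _ [] (by omega) hpre
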